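-- pv_equiv track=rewrite | github.com/Pratyush038/ai_health_planner | models/exercise_model.py | _modify_for_conditions
-- ===== SOURCE A (Python) =====
-- from typing import Dict, List
--
-- def _modify_for_conditions(exercises: List[str], conditions: List[str]) -> List[str]:
--     """Modify exercises based on health conditions"""
--     modified_exercises = exercises.copy()
--
--     if "arthritis" in conditions:
--         modified_exercises = [ex.replace("Running", "Walking").replace("Jump", "Step")
--                               for ex in modified_exercises]
--         modified_exercises.append("Joint mobility exercises")
--
--     if "asthma" in conditions:
--         modified_exercises = [ex.replace("HIIT", "Interval").replace("Running", "Brisk Walking")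
--                               for ex in modified_exercises]
--         modified_exercises.append("Breathing exercises")
--
--     if "hypertension" in conditions:
--         modified_exercises = [ex.replace("High intensity", "Moderate intensity")
--                               .replace("Heavy", "Moderate")
--                               for ex in modified_exercises]
--
--     return modified_exercises
-- ===== SOURCE B (Python) =====
-- from typing import List
--
-- def _modify_for_conditions(exercises: List[str], conditions: List[str]) -> List[str]:
--     """Single pass: apply every active condition's substitutions per exercise, then trailing appends."""
--     arthritis = "arthritis" in conditions
--     asthma = "asthma" in conditions
--     hypertension = "hypertension" in conditions
--     result = []
--     for ex in exercises:
--         if arthritis: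
--             ex = ex.replace("Running", "Walking").replace("Jump", "Step")
--         if asthma:
--             ex = ex.replace("HIIT", "Interval").replace("Running", "Brisk Walking")
--         if hypertension:
--             ex = ex.replace("High intensity", "Moderate intensity").replace("Heavy", "Moderate")
--         result.append(ex)
--     if arthritis:
--         result.append("Joint mobility exercises")
--     if asthma:
--         result.append("Breathing exercises")
--     return result
-- ===== Notes on version B (the rewrite author's own statement) =====
-- stated objective: alternative
-- what changed: Fuses A's up-to-three sequential list-comprehension passes (each rebuilding the whole list) into one loop over exercises applying the per-condition replacements to each element, with the two marker strings appended after the loop (exact because neither appended literal contains a later pass's target substring).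
import Mathlib
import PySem

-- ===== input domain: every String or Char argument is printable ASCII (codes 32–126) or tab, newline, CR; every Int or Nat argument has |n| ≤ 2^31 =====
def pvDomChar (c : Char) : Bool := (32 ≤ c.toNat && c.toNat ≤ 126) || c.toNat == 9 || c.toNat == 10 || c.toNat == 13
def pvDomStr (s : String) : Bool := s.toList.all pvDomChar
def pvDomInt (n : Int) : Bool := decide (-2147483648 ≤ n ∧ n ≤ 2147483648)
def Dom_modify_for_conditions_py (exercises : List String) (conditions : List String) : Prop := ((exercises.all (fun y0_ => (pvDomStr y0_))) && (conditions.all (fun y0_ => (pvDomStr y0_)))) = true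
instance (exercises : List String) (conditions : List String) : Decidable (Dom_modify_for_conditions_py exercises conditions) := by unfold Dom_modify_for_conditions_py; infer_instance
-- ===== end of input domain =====

-- B fuses A's three sequential comprehension passes into one pass per element plus trailing appends (objective: alternative decomposition).

-- ===== PORT A =====
-- literal transliteration: copy, then three conditional whole-list rebuild passes with appends
def modify_for_conditions_py (exercises : List String) (conditions : List String) : List String :=
  let modified := exercises
  let modified :=
    if conditions.contains "arthritis" then
      (modified.map (fun ex => PySem.Str.replace (PySem.Str.replace ex "Running" "Walking") "Jump" "Step"))
        ++ ["Joint mobility exercises"]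
    else modified
  let modified :=
    if conditions.contains "asthma" then
      (modified.map (fun ex => PySem.Str.replace (PySem.Str.replace ex "HIIT" "Interval") "Running" "Brisk Walking"))
        ++ ["Breathing exercises"]
    else modified
  let modified :=
    if conditions.contains "hypertension" then
      modified.map (fun ex => PySem.Str.replace (PySem.Str.replace ex "High intensity" "Moderate intensity") "Heavy" "Moderate")
    else modified
  modified

-- ===== PORT B =====
-- literal transliteration of Source B: one pass over exercises applying the guarded replacements, then trailing appends
def modify_for_conditions_py_alt (exercises : List String) (conditions : List String) : List String :=
  let arthritis := conditions.contains "arthritis"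
  let asthma := conditions.contains "asthma"
  let hypertension := conditions.contains "hypertension"
  let result := exercises.map (fun ex =>
    let ex := if arthritis then PySem.Str.replace (PySem.Str.replace ex "Running" "Walking") "Jump" "Step" else ex
    let ex := if asthma then PySem.Str.replace (PySem.Str.replace ex "HIIT" "Interval") "Running" "Brisk Walking" else ex
    let ex := if hypertension then PySem.Str.replace (PySem.Str.replace ex "High intensity" "Moderate intensity") "Heavy" "Moderate" else ex
    ex)
  let result := if arthritis then result ++ ["Joint mobility exercises"] else result
  let result := if asthma then result ++ ["Breathing exercises"] else result
  result

-- ===== PRECONDITION & SPEC =====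
def Spec_modify_for_conditions_py (exercises : List String) (conditions : List String) (out : List String) : Prop := out = modify_for_conditions_py_alt exercises conditions
instance (exercises : List String) (conditions : List String) (out : List String) : Decidable (Spec_modify_for_conditions_py exercises conditions out) := by unfold Spec_modify_for_conditions_py; infer_instance

-- ===== CLAIM (what is proved, stated in full; the proofs are below) =====
def Claim_equal_modify_for_conditions_py : Prop := ∀ (exercises : List String) (conditions : List String), Dom_modify_for_conditions_py exercises conditions → Spec_modify_for_conditions_py exercises conditions (modify_for_conditions_py exercises conditions)

-- ===== LEMMAS AND PROOFS =====
-- the appended marker literals are untouched by the later passes' replacements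
theorem joint_asthma : PySem.Str.replace (PySem.Str.replace "Joint mobility exercises" "HIIT" "Interval") "Running" "Brisk Walking" = "Joint mobility exercises" := by decide
theorem joint_hyper : PySem.Str.replace (PySem.Str.replace "Joint mobility exercises" "High intensity" "Moderate intensity") "Heavy" "Moderate" = "Joint mobility exercises" := by decide
theorem breath_hyper : PySem.Str.replace (PySem.Str.replace "Breathing exercises" "High intensity" "Moderate intensity") "Heavy" "Moderate" = "Breathing exercises" := by decide

-- ===== VERDICT (by name: the statement is the Claim_ definition above) =====
theorem modify_for_conditions_py_spec : Claim_equal_modify_for_conditions_py := by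
  intro exercises conditions _
  unfold Spec_modify_for_conditions_py modify_for_conditions_py modify_for_conditions_py_alt
  by_cases h1 : conditions.contains "arthritis" = true <;>
  by_cases h2 : conditions.contains "asthma" = true <;>
  by_cases h3 : conditions.contains "hypertension" = true <;>
    simp only [h1, h2, h3, if_true, if_false, Bool.false_eq_true,
      List.map_append, List.map_map, List.map_cons, List.map_nil,
      joint_asthma, joint_hyper, breath_hyper, List.append_assoc] <;>
    first
      | rfl
      | rw [List.map_id']
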